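-- pv_equiv track=rewrite | github.com/LucaMica02/AlgorithmsCourseSapienza | Dividi_Et_Impera/Dividi_Et_Impera_Exercises.py | findSub2
-- ===== SOURCE A (Python) =====
-- def findSub2(S):
--     n = len(S)
--     if n <= 1:
--         return 0
--     n //= 2
--     left = findSub2(S[:n])
--     right = findSub2(S[n:])
--     curr = S[:n].count('0') * S[n:].count('1')
--     return left + right + curr
-- ===== SOURCE B (Python) =====
-- def findSub2(S):
--     zeros = 0
--     total = 0
--     for c in S:
--         if c == '0':
--             zeros += 1
--         elif c == '1':
--             total += zeros
--     return total
-- ===== Notes on version B (the rewrite author's own statement) =====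
-- stated objective: faster
-- what changed: Replaced the divide-and-conquer recursion with slice copies and per-half .count passes by one linear scan keeping a running count of zeros seen, adding it for each '1'.
import Mathlib
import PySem

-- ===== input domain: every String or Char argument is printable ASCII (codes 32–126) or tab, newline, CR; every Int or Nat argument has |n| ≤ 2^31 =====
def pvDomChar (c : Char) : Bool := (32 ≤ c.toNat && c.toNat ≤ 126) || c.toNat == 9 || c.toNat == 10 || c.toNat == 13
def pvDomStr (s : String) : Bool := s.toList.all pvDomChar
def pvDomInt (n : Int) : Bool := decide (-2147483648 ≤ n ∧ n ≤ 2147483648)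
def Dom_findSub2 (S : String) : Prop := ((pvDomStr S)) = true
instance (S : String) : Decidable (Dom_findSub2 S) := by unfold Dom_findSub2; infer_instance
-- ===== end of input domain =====

-- B replaces A's divide-and-conquer (slices + per-half counts) by one linear pass with a
-- running zero counter; faster (O(n) vs O(n log n)).

-- ===== PORT A =====
-- recursion on the character list of S; S[:n]/S[n:] with 0 ≤ n ≤ len are exactly take/drop
-- (PySem.List.slice_natCast / slice_from_natCast), str.count of a single char is List.count,
-- and n //= 2 on the nonnegative n = len(S) is exactly Nat division of the length.
def findSub2Aux (l : List Char) : Int :=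
  let n := l.length
  if n ≤ 1 then 0
  else
    let m := n / 2
    let left := findSub2Aux (l.take m)
    let right := findSub2Aux (l.drop m)
    let curr : Int := ((l.take m).count '0' : Int) * ((l.drop m).count '1' : Int)
    left + right + curr
termination_by l.length
decreasing_by
  · simp only [List.length_take]; omega
  · simp only [List.length_drop]; omega

def findSub2 (S : String) : Int := findSub2Aux S.toList

-- ===== PORT B =====
def findSub2_alt (S : String) : Int :=
  (S.toList.foldl
    (fun (st : Int × Int) c =>
      if c = '0' then (st.1 + 1, st.2)
      else if c = '1' then (st.1, st.2 + st.1)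
      else st)
    (0, 0)).2

-- ===== PRECONDITION & SPEC =====
def Spec_findSub2 (S : String) (out : Int) : Prop := out = findSub2_alt S
instance (S : String) (out : Int) : Decidable (Spec_findSub2 S out) := by unfold Spec_findSub2; infer_instance

-- ===== CLAIM (what is proved, stated in full; the proofs are below) =====
def Claim_equal_findSub2 : Prop := ∀ (S : String), Dom_findSub2 S → Spec_findSub2 S (findSub2 S)

-- ===== LEMMAS AND PROOFS =====

-- B's loop step
def pvStep (st : Int × Int) (c : Char) : Int × Int :=
  if c = '0' then (st.1 + 1, st.2)
  else if c = '1' then (st.1, st.2 + st.1)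
  else st

-- one-step unfolding of A's recursion (zeta-reduced)
theorem pvAux_unfold (l : List Char) :
    findSub2Aux l =
      if l.length ≤ 1 then 0
      else findSub2Aux (l.take (l.length / 2)) + findSub2Aux (l.drop (l.length / 2)) +
        ((l.take (l.length / 2)).count '0' : Int) * ((l.drop (l.length / 2)).count '1' : Int) := by
  rw [findSub2Aux]

-- running the loop from (z, t): final zero-count is z + #'0', final total is
-- t + z * #'1' + (pairs counted from (0,0))
theorem pvFold_char (l : List Char) (z t : Int) :
    l.foldl pvStep (z, t) =
      (z + (l.count '0' : Int),
       t + z * (l.count '1' : Int) + (l.foldl pvStep (0, 0)).2) := by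
  induction l generalizing z t with
  | nil => simp
  | cons c rest ih =>
    by_cases h0 : c = '0'
    · subst h0
      simp only [List.foldl_cons, List.count_cons, pvStep, reduceIte, beq_self_eq_true]
      rw [ih (z + 1) t, ih (0 + 1) 0]
      simp only [Prod.mk.injEq]
      constructor <;> push_cast <;> ring
    · by_cases h1 : c = '1'
      · subst h1
        simp only [List.foldl_cons, List.count_cons, pvStep, if_neg h0,
          beq_iff_eq, beq_self_eq_true, if_true, Nat.add_zero]
        rw [ih z (t + z), ih 0 (0 + 0)]
        simp only [Prod.mk.injEq]
        constructor <;> push_cast <;> ring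
      · simp only [List.foldl_cons, List.count_cons, pvStep, beq_iff_eq, h0, h1, if_false, Nat.add_zero]
        rw [ih z t]

-- A equals B's loop value, by strong induction on the length via the append split take/drop
theorem pvAux_eq (n : Nat) (l : List Char) (hl : l.length = n) :
    findSub2Aux l = (l.foldl pvStep (0, 0)).2 := by
  induction n using Nat.strong_induction_on generalizing l with
  | _ n ih =>
    rw [pvAux_unfold]
    by_cases h : l.length ≤ 1
    · rw [if_pos h]
      rcases l with _ | ⟨c, _ | ⟨d, tl⟩⟩
      · simp
      · simp only [List.foldl_cons, List.foldl_nil, pvStep]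
        split_ifs <;> simp
      · exfalso; simp at h
    · rw [if_neg h]
      have h2 : 2 ≤ l.length := by omega
      have hTake : (l.take (l.length / 2)).length = l.length / 2 := by
        simp; omega
      have hDrop : (l.drop (l.length / 2)).length = l.length - l.length / 2 := by simp
      rw [ih (l.length / 2) (by omega) _ hTake,
          ih (l.length - l.length / 2) (by omega) _ hDrop]
      conv_rhs => rw [← List.take_append_drop (l.length / 2) l]
      rw [List.foldl_append, pvFold_char (l.take (l.length / 2)) 0 0]
      conv_rhs => rw [pvFold_char]
      push_cast
      simp
      ring

-- ===== VERDICT (by name: the statement is the Claim_ definition above) =====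
theorem findSub2_spec : Claim_equal_findSub2 := by
  intro S _
  unfold Spec_findSub2 findSub2 findSub2_alt
  have := pvAux_eq S.toList.length S.toList rfl
  simpa [pvStep] using this
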